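-- pv_equiv track=rewrite | github.com/jayaprakash9603/MountBlue-Job-Challenge | SumVsXOR.py | sumXor
-- ===== SOURCE A (Python) =====
-- def sumXor(n):
--     # Write your code here
--     # Count the number of unset bits in n
--     count_unset_bits = 0
--     while n:
--         if n % 2 == 0:
--             count_unset_bits += 1
--         n //= 2
--
--     # Calculate the total number of values satisfying the condition
--     result = 2 ** count_unset_bits
--     return result
-- ===== SOURCE B (Python) =====
-- def sumXor(n):
--     # closed form: unset bits below the top set bit = bit_length - popcount
--     return 2 ** (n.bit_length() - bin(n).count("1"))
-- ===== Notes on version B (the rewrite author's own statement) =====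
-- stated objective: simpler
-- what changed: Replaces the halving loop that counts even remainders with a one-line closed form: two to the power of (bit_length minus popcount).
import Mathlib
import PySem

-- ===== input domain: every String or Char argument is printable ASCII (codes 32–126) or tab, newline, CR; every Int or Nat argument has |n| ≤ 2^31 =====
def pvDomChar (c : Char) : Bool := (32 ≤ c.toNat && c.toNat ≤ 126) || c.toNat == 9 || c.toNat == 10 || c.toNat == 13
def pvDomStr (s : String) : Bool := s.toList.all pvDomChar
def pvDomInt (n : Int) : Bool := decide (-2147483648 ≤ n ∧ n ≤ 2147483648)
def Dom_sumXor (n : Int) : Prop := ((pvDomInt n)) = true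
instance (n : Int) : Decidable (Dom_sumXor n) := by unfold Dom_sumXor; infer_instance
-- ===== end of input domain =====

-- B replaces A's halving loop (counting even remainders) by the closed form
-- 2 ** (bit_length - popcount); proved equal for all n ≥ 0 (A loops forever on n < 0).

-- ===== PORT A =====
-- the while loop of A; the `n ≤ 0` guard only makes the recursion total
-- (for n < 0 Python's loop never terminates; Pre_ excludes those inputs)
def sumXorLoop (n : Int) (count : Int) : Int :=
  if n ≤ 0 then count
  else sumXorLoop (PySem.Int.floordiv n 2)
         (if PySem.Int.mod n 2 = 0 then count + 1 else count)
termination_by n.toNat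
decreasing_by
  simp [PySem.Int.floordiv, Int.fdiv_eq_ediv]
  omega

def sumXor (n : Int) : Int :=
  2 ^ (sumXorLoop n 0).toNat  -- count is always ≥ 0; Python's 2 ** count

-- ===== PORT B =====
def sumXor_alt (n : Int) : Int :=
  2 ^ (PySem.Int.bitLength n - PySem.Int.bitCount n)

-- ===== PRECONDITION & SPEC =====
-- A's while loop never terminates for negative n (floor halving stabilises at minus one), so Pre_ keeps n ≥ 0.
def Pre_sumXor (n : Int) : Prop := 0 ≤ n
instance (n : Int) : Decidable (Pre_sumXor n) := by unfold Pre_sumXor; infer_instance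
def pvWitness_sumXor : Int := (12)

def Spec_sumXor (n : Int) (out : Int) : Prop := out = sumXor_alt n
instance (n : Int) (out : Int) : Decidable (Spec_sumXor n out) := by unfold Spec_sumXor; infer_instance

-- ===== CLAIM (what is proved, stated in full; the proofs are below) =====
def Claim_equal_sumXor : Prop := ∀ (n : Int), Dom_sumXor n → Pre_sumXor n → Spec_sumXor n (sumXor n)

-- ===== LEMMAS AND PROOFS =====

-- loop invariant: the loop adds (bitLength - bitCount) to the accumulator
theorem sumXorLoop_eq (m : Nat) : ∀ c : Int,
    sumXorLoop (m : Int) c = c + ((PySem.Int.bitLength (m : Int) - PySem.Int.bitCount (m : Int) : Nat) : Int) := by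
  induction m using Nat.strong_induction_on with
  | _ m ih =>
    intro c
    by_cases h0 : m = 0
    · subst h0
      rw [sumXorLoop.eq_def]
      simp [PySem.Int.bitLength_zero, PySem.Int.bitCount_zero]
    · have hm : 0 < m := Nat.pos_of_ne_zero h0
      rw [sumXorLoop.eq_def]
      have hfd : PySem.Int.floordiv (m : Int) 2 = ((m / 2 : Nat) : Int) := by
        simp [PySem.Int.floordiv]
        rw [Int.fdiv_eq_ediv]
        push_cast [Int.natCast_div]
        simp
      have hmod : PySem.Int.mod (m : Int) 2 = ((m % 2 : Nat) : Int) := by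
        simp [PySem.Int.mod]
        rw [Int.fmod_eq_emod]
        push_cast
        simp
      have hle : ¬ ((m : Int) ≤ 0) := by exact_mod_cast Nat.not_le.mpr hm
      rw [if_neg hle, hfd, hmod, ih (m / 2) (Nat.div_lt_self hm (by norm_num))]
      have hBL := PySem.Int.bitLength_natCast hm
      have hBC := PySem.Int.bitCount_natCast hm
      have hle2 := PySem.Int.bitCount_le_bitLength ((m / 2 : Nat) : Int)
      rcases Nat.even_or_odd m with he | ho
      · have h2 : m % 2 = 0 := Nat.even_iff.mp he
        rw [if_pos (by simp [h2])]
        rw [hBL, hBC, h2]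
        omega
      · have h2 : m % 2 = 1 := Nat.odd_iff.mp ho
        rw [if_neg (by simp [h2])]
        rw [hBL, hBC, h2]
        omega

-- ===== VERDICT (by name: the statement is the Claim_ definition above) =====
theorem sumXor_spec : Claim_equal_sumXor := by
  intro n _ hpre
  unfold Spec_sumXor sumXor sumXor_alt
  obtain ⟨m, rfl⟩ := Int.eq_ofNat_of_zero_le hpre
  rw [sumXorLoop_eq m 0]
  simp
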